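-- pv_equiv track=rewrite | github.com/BUCT-CS1808-SoftwareEngineering/MusemData_Collection_System | museum/spiders/collection125.py | zhaotu
-- ===== SOURCE A (Python) =====
-- def zhaotu(str):
--     cnt=0
--     l=0
--     r=0
--     for i in str:
--         if(str[cnt:cnt+3]=="src"):
--             l=cnt
--         if(str[cnt]=='"'and cnt>l+4 and l!=0):
--             r=cnt
--         cnt+=1
--     return 'http://www.jgsgmbwg.com/'+str[l+5:r]
-- ===== SOURCE B (Python) =====
-- def zhaotu(str):
--     base = 'http://www.jgsgmbwg.com/'
--     l = str.rfind("src")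
--     if l <= 0:
--         return base
--     r = str.rfind('"', l + 5)
--     if r < 0:
--         return base
--     return base + str[l + 5:r]
-- ===== Notes on version B (the rewrite author's own statement) =====
-- stated objective: faster
-- what changed: Replaced the forward character-by-character state machine (running l/r registers updated at every index) with two direct backward searches via str.rfind for the last src marker and for the last qualifying quote, with early returns of the bare prefix.
import Mathlib
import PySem

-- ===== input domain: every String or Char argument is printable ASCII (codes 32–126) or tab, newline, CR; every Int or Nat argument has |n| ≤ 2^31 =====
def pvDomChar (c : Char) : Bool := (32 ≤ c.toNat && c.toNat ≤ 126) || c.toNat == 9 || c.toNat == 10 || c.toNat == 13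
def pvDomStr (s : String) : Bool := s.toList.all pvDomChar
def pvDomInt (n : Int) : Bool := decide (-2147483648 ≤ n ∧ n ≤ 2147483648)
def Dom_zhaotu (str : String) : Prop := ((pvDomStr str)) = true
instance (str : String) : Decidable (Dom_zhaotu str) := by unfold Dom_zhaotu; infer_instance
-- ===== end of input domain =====

-- B replaces A's forward one-pass state machine by two backward searches (rfind), same return value.

-- ===== PORT A =====
-- forward loop: cnt counts indices; l := last index where str[cnt:cnt+3]=="src";
-- r := last index with a '"' satisfying cnt>l+4 and l!=0 (l as of that moment)
def zhaotu (str : String) : String :=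
  let cs := str.toList
  let st := cs.foldl (fun (st : Int × Int × Int) _ =>
      let cnt := st.1
      let l := if PySem.List.slice cs (some cnt) (some (cnt + 3)) = "src".toList then cnt else st.2.1
      let r := if PySem.List.pyGet? cs cnt = some '"' ∧ cnt > l + 4 ∧ l ≠ 0 then cnt else st.2.2
      (cnt + 1, l, r)) (0, 0, 0)
  String.ofList ("http://www.jgsgmbwg.com/".toList ++ PySem.List.slice cs (some (st.2.1 + 5)) (some st.2.2))

-- ===== PORT B =====
-- l = str.rfind("src"); early return if l <= 0; r = str.rfind('"', l+5); early return if r < 0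
def zhaotu_alt (str : String) : String :=
  let l := PySem.Str.rfind str "src"
  if l ≤ 0 then "http://www.jgsgmbwg.com/"
  else
    let r := PySem.Str.rfindFrom str "\"" (l + 5)
    if r < 0 then "http://www.jgsgmbwg.com/"
    else String.ofList ("http://www.jgsgmbwg.com/".toList ++ PySem.List.slice str.toList (some (l + 5)) (some r))

-- ===== PRECONDITION & SPEC =====
def Spec_zhaotu (str : String) (out : String) : Prop := out = zhaotu_alt str
instance (str : String) (out : String) : Decidable (Spec_zhaotu str out) := by unfold Spec_zhaotu; infer_instance

-- ===== CLAIM (what is proved, stated in full; the proofs are below) =====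
def Claim_equal_zhaotu : Prop := ∀ (str : String), Dom_zhaotu str → Spec_zhaotu str (zhaotu str)

-- ===== LEMMAS AND PROOFS =====

-- "src" starts at index j / a '"' sits at index j
def srcAtB (cs : List Char) (j : Nat) : Bool := "src".toList.isPrefixOf (cs.drop j)
def quoteAtB (cs : List Char) (j : Nat) : Bool := cs[j]? == some '"'

-- the value of A's register l after processing indices [0,k)
def Lfun (cs : List Char) : Nat → Nat
  | 0 => 0
  | k+1 => if srcAtB cs k then k else Lfun cs k

-- the value of A's register r after processing indices [0,k)
def Rfun (cs : List Char) : Nat → Nat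
  | 0 => 0
  | k+1 => if quoteAtB cs k ∧ Lfun cs (k+1) + 4 < k ∧ Lfun cs (k+1) ≠ 0 then k else Rfun cs k

theorem Lfun_succ (cs : List Char) (k : Nat) :
    Lfun cs (k+1) = if srcAtB cs k then k else Lfun cs k := rfl

theorem Rfun_succ (cs : List Char) (k : Nat) :
    Rfun cs (k+1) = if quoteAtB cs k ∧ Lfun cs (k+1) + 4 < k ∧ Lfun cs (k+1) ≠ 0 then k
      else Rfun cs k := rfl

-- one iteration of A's loop body, let-free
def stepA (cs : List Char) (st : Int × Int × Int) : Int × Int × Int :=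
  (st.1 + 1,
   if PySem.List.slice cs (some st.1) (some (st.1 + 3)) = "src".toList then st.1 else st.2.1,
   if PySem.List.pyGet? cs st.1 = some '"' ∧
        st.1 > (if PySem.List.slice cs (some st.1) (some (st.1 + 3)) = "src".toList then st.1 else st.2.1) + 4 ∧
        (if PySem.List.slice cs (some st.1) (some (st.1 + 3)) = "src".toList then st.1 else st.2.1) ≠ 0
    then st.1 else st.2.2)

theorem foldl_stepA (cs : List Char) (l : List Char) (init : Int × Int × Int) :
    l.foldl (fun (st : Int × Int × Int) (_ : Char) =>
      let cnt := st.1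
      let l := if PySem.List.slice cs (some cnt) (some (cnt + 3)) = "src".toList then cnt else st.2.1
      let r := if PySem.List.pyGet? cs cnt = some '"' ∧ cnt > l + 4 ∧ l ≠ 0 then cnt else st.2.2
      (cnt + 1, l, r)) init = (stepA cs)^[l.length] init := by
  induction l generalizing init with
  | nil => rfl
  | cons a t ih =>
    rw [List.foldl_cons, ih, List.length_cons, Function.iterate_succ_apply]
    rfl

theorem srcAtB_iff_slice (cs : List Char) (k : Nat) :
    PySem.List.slice cs (some (k : Int)) (some ((k : Int) + 3)) = "src".toList ↔ srcAtB cs k = true := by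
  have h3 : ((k : Int) + 3) = ((k + 3 : Nat) : Int) := by push_cast; ring
  rw [h3, PySem.List.slice_natCast]
  have hkk : k + 3 - k = 3 := by omega
  rw [hkk]
  unfold srcAtB
  rw [List.isPrefixOf_iff_prefix, List.prefix_iff_eq_take]
  exact eq_comm

theorem stepA_iter (cs : List Char) (k : Nat) :
    (stepA cs)^[k] (0, 0, 0) = ((k : Int), ((Lfun cs k : Nat) : Int), ((Rfun cs k : Nat) : Int)) := by
  induction k with
  | zero => rfl
  | succ k ih =>
    rw [Function.iterate_succ_apply', ih]
    have hget : PySem.List.pyGet? cs ((k : Nat) : Int) = cs[k]? := PySem.List.pyGet?_natCast cs k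
    have hL1 : (if PySem.List.slice cs (some (k : Int)) (some ((k : Int) + 3)) = "src".toList
        then (k : Int) else ((Lfun cs k : Nat) : Int)) = ((Lfun cs (k+1) : Nat) : Int) := by
      by_cases hs : srcAtB cs k = true
      · rw [if_pos ((srcAtB_iff_slice cs k).mpr hs), Lfun_succ, if_pos hs]
      · rw [if_neg (fun h => hs ((srcAtB_iff_slice cs k).mp h)), Lfun_succ, if_neg hs]
    have hR1 : (if PySem.List.pyGet? cs ((k : Nat) : Int) = some '"' ∧
          (k : Int) > ((Lfun cs (k+1) : Nat) : Int) + 4 ∧ ((Lfun cs (k+1) : Nat) : Int) ≠ 0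
        then (k : Int) else ((Rfun cs k : Nat) : Int)) = ((Rfun cs (k+1) : Nat) : Int) := by
      have hiff : (PySem.List.pyGet? cs ((k : Nat) : Int) = some '"' ∧
          (k : Int) > ((Lfun cs (k+1) : Nat) : Int) + 4 ∧ ((Lfun cs (k+1) : Nat) : Int) ≠ 0) ↔
          (quoteAtB cs k = true ∧ Lfun cs (k+1) + 4 < k ∧ Lfun cs (k+1) ≠ 0) := by
        rw [hget]
        unfold quoteAtB
        rw [beq_iff_eq]
        constructor
        · rintro ⟨h1, h2, h3⟩; exact ⟨h1, by omega, by omega⟩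
        · rintro ⟨h1, h2, h3⟩; exact ⟨h1, by omega, by omega⟩
      by_cases hq : quoteAtB cs k = true ∧ Lfun cs (k+1) + 4 < k ∧ Lfun cs (k+1) ≠ 0
      · rw [if_pos (hiff.mpr hq), Rfun_succ, if_pos hq]
      · rw [if_neg (fun h => hq (hiff.mp h)), Rfun_succ, if_neg hq]
    show ((k : Int) + 1, _, _) = _
    rw [hL1, hR1]
    refine Prod.ext ?_ rfl
    push_cast; ring

theorem zhaotu_eval (str : String) :
    zhaotu str = String.ofList ("http://www.jgsgmbwg.com/".toList ++
      PySem.List.slice str.toList (some ((Lfun str.toList str.toList.length + 5 : Nat) : Int))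
        (some ((Rfun str.toList str.toList.length : Nat) : Int))) := by
  unfold zhaotu
  simp only [foldl_stepA, stepA_iter]
  push_cast
  ring_nf

-- srcAtB / quoteAtB imply the index is in range
theorem srcAtB_lt (cs : List Char) (j : Nat) (h : srcAtB cs j = true) : j < cs.length := by
  by_contra hn
  have : cs.drop j = [] := List.drop_eq_nil_of_le (by omega)
  unfold srcAtB at h
  rw [this] at h
  simp at h

theorem quoteAtB_lt (cs : List Char) (j : Nat) (h : quoteAtB cs j = true) : j < cs.length := by
  unfold quoteAtB at h
  rw [beq_iff_eq] at h
  exact (List.getElem?_eq_some_iff.mp h).1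

-- Lfun facts
theorem Lfun_zero_or (cs : List Char) (k : Nat) :
    Lfun cs k = 0 ∨ (0 < Lfun cs k ∧ Lfun cs k < k ∧ srcAtB cs (Lfun cs k) = true) := by
  induction k with
  | zero => left; rfl
  | succ k ih =>
    rw [Lfun_succ]
    by_cases hs : srcAtB cs k = true
    · rw [if_pos hs]
      rcases Nat.eq_zero_or_pos k with hk | hk
      · left; omega
      · right; exact ⟨hk, by omega, hs⟩
    · rw [if_neg hs]
      rcases ih with h | ⟨h1, h2, h3⟩
      · left; exact h
      · right; exact ⟨h1, by omega, h3⟩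

theorem Lfun_ub (cs : List Char) (k j : Nat) (hj : j < k) (hs : srcAtB cs j = true) :
    j ≤ Lfun cs k := by
  induction k with
  | zero => omega
  | succ k ih =>
    rw [Lfun_succ]
    by_cases hsk : srcAtB cs k = true
    · rw [if_pos hsk]; omega
    · rw [if_neg hsk]
      rcases Nat.lt_succ_iff_lt_or_eq.mp hj with h | h
      · exact ih h
      · subst h; exact absurd hs hsk

theorem Lfun_mono (cs : List Char) (k m : Nat) (h : k ≤ m) : Lfun cs k ≤ Lfun cs m := by
  induction m with
  | zero =>
    have hk : k = 0 := by omega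
    subst hk; exact le_refl _
  | succ m ih =>
    rcases Nat.le_succ_iff.mp h with h' | h'
    · have hkm := ih h'
      rw [Lfun_succ]
      by_cases hs : srcAtB cs m = true
      · rw [if_pos hs]
        rcases Lfun_zero_or cs k with h0 | ⟨_, h2, _⟩
        · omega
        · omega
      · rw [if_neg hs]; exact hkm
    · subst h'; exact le_refl _

-- Lfun is exactly the position of the last "src" once one exists after index 0
theorem Lfun_eq_of_max (cs : List Char) (l m : Nat) (hl : srcAtB cs l = true)
    (hmax : ∀ j, l < j → srcAtB cs j = false) (hm : l < m) : Lfun cs m = l := by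
  have h1 : l ≤ Lfun cs m := Lfun_ub cs m l hm hl
  rcases Lfun_zero_or cs m with h0 | ⟨hp, hlt, hs⟩
  · omega
  · by_contra hne
    have : l < Lfun cs m := by omega
    rw [hmax _ this] at hs
    exact Bool.false_ne_true hs

-- Rfun facts
theorem Rfun_zero_or (cs : List Char) (k : Nat) :
    Rfun cs k = 0 ∨ (Rfun cs k < k ∧ quoteAtB cs (Rfun cs k) = true ∧
      Lfun cs (Rfun cs k + 1) + 4 < Rfun cs k ∧ Lfun cs (Rfun cs k + 1) ≠ 0) := by
  induction k with
  | zero => left; rfl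
  | succ k ih =>
    rw [Rfun_succ]
    by_cases hq : quoteAtB cs k = true ∧ Lfun cs (k+1) + 4 < k ∧ Lfun cs (k+1) ≠ 0
    · rw [if_pos hq]
      right
      exact ⟨by omega, hq.1, hq.2.1, hq.2.2⟩
    · rw [if_neg hq]
      rcases ih with h | ⟨h1, h2, h3, h4⟩
      · left; exact h
      · right; exact ⟨by omega, h2, h3, h4⟩

theorem Rfun_ub (cs : List Char) (k q : Nat) (hq : q < k) (h1 : quoteAtB cs q = true)
    (h2 : Lfun cs (q + 1) + 4 < q) (h3 : Lfun cs (q + 1) ≠ 0) : q ≤ Rfun cs k := by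
  induction k with
  | zero => omega
  | succ k ih =>
    rw [Rfun_succ]
    by_cases hc : quoteAtB cs k = true ∧ Lfun cs (k+1) + 4 < k ∧ Lfun cs (k+1) ≠ 0
    · rw [if_pos hc]; omega
    · rw [if_neg hc]
      rcases Nat.lt_succ_iff_lt_or_eq.mp hq with h | h
      · exact ih h
      · subst h; exact absurd ⟨h1, h2, h3⟩ hc

-- if l never leaves 0, r stays 0
theorem Rfun_eq_zero_of_L_zero (cs : List Char) (h : Lfun cs cs.length = 0) :
    Rfun cs cs.length = 0 := by
  rcases Rfun_zero_or cs cs.length with h0 | ⟨h1, h2, h3, h4⟩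
  · exact h0
  · have : Lfun cs (Rfun cs cs.length + 1) ≤ Lfun cs cs.length :=
      Lfun_mono cs _ _ (by omega)
    omega

-- characterisation of PySem.Chars.rfind.go : the largest j ≤ k where sub starts, else -1
theorem rfind_go_succ (cs sub : List Char) (k : Nat) :
    PySem.Chars.rfind.go cs sub (k+1) =
      if sub.isPrefixOf (cs.drop (k+1)) then ((k+1 : Nat) : Int) else PySem.Chars.rfind.go cs sub k := rfl

theorem rfind_go_zero (cs sub : List Char) :
    PySem.Chars.rfind.go cs sub 0 = if sub.isPrefixOf cs then 0 else -1 := rfl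

theorem rfind_go_cases (cs sub : List Char) (k : Nat) :
    (PySem.Chars.rfind.go cs sub k = -1 ∧ ∀ j, j ≤ k → sub.isPrefixOf (cs.drop j) = false) ∨
    (∃ j : Nat, j ≤ k ∧ PySem.Chars.rfind.go cs sub k = (j : Int) ∧
      sub.isPrefixOf (cs.drop j) = true ∧ ∀ i, i ≤ k → sub.isPrefixOf (cs.drop i) = true → i ≤ j) := by
  induction k with
  | zero =>
    rw [rfind_go_zero]
    by_cases h : sub.isPrefixOf cs = true
    · right
      refine ⟨0, le_refl 0, by rw [if_pos h]; rfl, by simpa using h, fun i hi _ => hi⟩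
    · left
      rw [if_neg h]
      refine ⟨rfl, fun j hj => ?_⟩
      have hj0 : j = 0 := by omega
      subst hj0
      simpa using Bool.eq_false_iff.mpr h
  | succ k ih =>
    rw [rfind_go_succ]
    by_cases h : sub.isPrefixOf (cs.drop (k+1)) = true
    · right
      exact ⟨k+1, le_refl _, by rw [if_pos h], h, fun i hi _ => hi⟩
    · rw [if_neg h]
      rcases ih with ⟨h1, h2⟩ | ⟨j, hj1, hj2, hj3, hj4⟩
      · left
        refine ⟨h1, fun j hj => ?_⟩
        rcases Nat.le_succ_iff.mp hj with h' | h'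
        · exact h2 j h'
        · subst h'; exact Bool.eq_false_iff.mpr h
      · right
        refine ⟨j, by omega, hj2, hj3, fun i hi hp => ?_⟩
        rcases Nat.le_succ_iff.mp hi with h' | h'
        · exact hj4 i h' hp
        · subst h'; exact absurd hp h

-- singleton prefix at an offset = character at that index
theorem quote_prefix_iff (cs : List Char) (m : Nat) :
    ['"'].isPrefixOf (cs.drop m) = true ↔ quoteAtB cs m = true := by
  unfold quoteAtB
  rw [List.isPrefixOf_iff_prefix, beq_iff_eq, ← List.head?_drop]
  cases h : cs.drop m with
  | nil => simp
  | cons a t =>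
    simp only [List.cons_prefix_cons, List.nil_prefix, and_true, List.head?_cons,
      Option.some.injEq]
    exact eq_comm

-- rfindFrom with a nonnegative natural start and no end
theorem rfindFrom_natCast (cs sub : List Char) (k : Nat) :
    PySem.Chars.rfindFrom cs sub (k : Int) none =
      if (cs.length : Int) < (k : Int) then -1
      else if PySem.Chars.rfind (cs.drop k) sub = -1 then -1
      else (k : Int) + PySem.Chars.rfind (cs.drop k) sub := by
  have h1 : ¬ ((k : Int) < 0) := by omega
  simp only [PySem.Chars.rfindFrom, if_neg h1, Int.toNat_natCast, List.take_length]

-- B's body, zeta-reduced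
theorem zhaotu_alt_eval (str : String) :
    zhaotu_alt str =
      if PySem.Str.rfind str "src" ≤ 0 then "http://www.jgsgmbwg.com/"
      else if PySem.Str.rfindFrom str "\"" (PySem.Str.rfind str "src" + 5) < 0 then
        "http://www.jgsgmbwg.com/"
      else String.ofList ("http://www.jgsgmbwg.com/".toList ++
        PySem.List.slice str.toList (some (PySem.Str.rfind str "src" + 5))
          (some (PySem.Str.rfindFrom str "\"" (PySem.Str.rfind str "src" + 5)))) := rfl

theorem slice_nat_nil (cs : List Char) (a b : Nat) (h : b ≤ a) :
    PySem.List.slice cs (some (a : Int)) (some (b : Int)) = [] := by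
  rw [PySem.List.slice_natCast]
  have hb : b - a = 0 := by omega
  rw [hb, List.take_zero]

theorem ofList_base_nil :
    String.ofList ("http://www.jgsgmbwg.com/".toList ++ ([] : List Char)) =
      "http://www.jgsgmbwg.com/" := by
  rw [List.append_nil]
  rfl

theorem quoteAt_of_drop (cs : List Char) (m i : Nat)
    (h : List.isPrefixOf ['"'] ((cs.drop m).drop i) = true) : quoteAtB cs (i + m) = true := by
  rw [List.drop_drop, Nat.add_comm] at h
  exact (quote_prefix_iff cs (i + m)).mp h

theorem drop_prefix_of_quoteAt (cs : List Char) (m i : Nat) (h : quoteAtB cs (i + m) = true) :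
    List.isPrefixOf ['"'] ((cs.drop m).drop i) = true := by
  rw [List.drop_drop, Nat.add_comm]
  exact (quote_prefix_iff cs (i + m)).mpr h

-- ===== VERDICT (by name: the statement is the Claim_ definition above) =====
theorem zhaotu_spec : Claim_equal_zhaotu := by
  intro str _
  unfold Spec_zhaotu
  rw [zhaotu_eval, zhaotu_alt_eval]
  have hgo : PySem.Str.rfind str "src" =
      PySem.Chars.rfind.go str.toList "src".toList str.toList.length := by
    rw [PySem.Str.rfind_eq]; rfl
  rcases rfind_go_cases str.toList "src".toList str.toList.length with
    ⟨hneg, hnone⟩ | ⟨j, hjn, hjval, hjsrc, hjmax⟩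
  · -- no "src" anywhere: A keeps l = r = 0, B returns the bare prefix
    have hL0 : Lfun str.toList str.toList.length = 0 := by
      rcases Lfun_zero_or str.toList str.toList.length with h | ⟨_, _, hs⟩
      · exact h
      · exact absurd hs (by unfold srcAtB; rw [hnone _ (le_of_lt (srcAtB_lt _ _ hs))]; simp)
    have hR0 : Rfun str.toList str.toList.length = 0 := Rfun_eq_zero_of_L_zero _ hL0
    rw [hL0, hR0, hgo, hneg, if_pos (by norm_num),
      slice_nat_nil str.toList 5 0 (by omega), ofList_base_nil]
  · by_cases hj0 : j = 0
    · -- last "src" at index 0: A's l stays 0 (l != 0 never fires), B early-returns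
      subst hj0
      have hL0 : Lfun str.toList str.toList.length = 0 := by
        rcases Lfun_zero_or str.toList str.toList.length with h | ⟨hp, _, hs⟩
        · exact h
        · have := hjmax _ (le_of_lt (srcAtB_lt _ _ hs)) hs
          omega
      have hR0 : Rfun str.toList str.toList.length = 0 := Rfun_eq_zero_of_L_zero _ hL0
      rw [hL0, hR0, hgo, hjval, if_pos (by norm_num),
        slice_nat_nil str.toList 5 0 (by omega), ofList_base_nil]
    · -- last "src" at index j > 0
      have hjlt : j < str.toList.length := srcAtB_lt _ _ hjsrc
      have hmax' : ∀ i, j < i → srcAtB str.toList i = false := by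
        intro i hi
        refine Bool.eq_false_iff.mpr fun hp => ?_
        have := hjmax i (le_of_lt (srcAtB_lt _ _ hp)) hp
        omega
      have hLn : Lfun str.toList str.toList.length = j :=
        Lfun_eq_of_max str.toList j str.toList.length hjsrc hmax' hjlt
      have hnotle : ¬ (PySem.Str.rfind str "src" ≤ 0) := by
        rw [hgo, hjval]; omega
      rw [if_neg hnotle, hLn]
      have hcast : PySem.Str.rfind str "src" + 5 = ((j + 5 : Nat) : Int) := by
        rw [hgo, hjval]; push_cast; ring
      have hrf : PySem.Str.rfindFrom str "\"" (PySem.Str.rfind str "src" + 5) =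
          PySem.Chars.rfindFrom str.toList ['"'] ((j + 5 : Nat) : Int) := by
        rw [PySem.Str.rfindFrom_eq, hcast]; rfl
      by_cases hlen : (str.toList.length : Int) < ((j + 5 : Nat) : Int)
      · -- the tail str[l+5:] is empty: no quote can qualify, both give the bare prefix
        have hr : PySem.Str.rfindFrom str "\"" (PySem.Str.rfind str "src" + 5) = -1 := by
          rw [hrf, rfindFrom_natCast, if_pos hlen]
        have hRlt : Rfun str.toList str.toList.length < j + 5 := by
          rcases Rfun_zero_or str.toList str.toList.length with h0 | ⟨h1, _, _, _⟩
          · omega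
          · omega
        rw [hr, if_pos (by norm_num),
          slice_nat_nil str.toList (j + 5) (Rfun str.toList str.toList.length) (by omega),
          ofList_base_nil]
      · have hds : (str.toList.drop (j + 5)).length = str.toList.length - (j + 5) :=
          List.length_drop
        rcases rfind_go_cases (str.toList.drop (j + 5)) ['"']
            ((str.toList.drop (j + 5)).length) with ⟨hqneg, hqnone⟩ | ⟨i, hin, hival, hipre, himax⟩
        · -- no quote at index ≥ j+5: A's slice is empty, B early-returns
          have hr : PySem.Str.rfindFrom str "\"" (PySem.Str.rfind str "src" + 5) = -1 := by
            rw [hrf, rfindFrom_natCast, if_neg hlen]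
            have : PySem.Chars.rfind (str.toList.drop (j + 5)) ['"'] = -1 := hqneg
            rw [this, if_pos rfl]
          have hRlt : Rfun str.toList str.toList.length < j + 5 := by
            rcases Rfun_zero_or str.toList str.toList.length with h0 | ⟨h1, h2, _, _⟩
            · omega
            · by_contra hge
              have hi : Rfun str.toList str.toList.length - (j + 5) + (j + 5) =
                  Rfun str.toList str.toList.length := by omega
              have hpre := drop_prefix_of_quoteAt str.toList (j + 5)
                (Rfun str.toList str.toList.length - (j + 5)) (by rw [hi]; exact h2)
              have := hqnone (Rfun str.toList str.toList.length - (j + 5)) (by omega)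
              rw [this] at hpre
              exact Bool.false_ne_true hpre
          rw [hr, if_pos (by norm_num),
            slice_nat_nil str.toList (j + 5) (Rfun str.toList str.toList.length) (by omega),
            ofList_base_nil]
        · -- last quote at index q* = i + (j+5) ≥ j+5: both return the slice up to it
          have hq : quoteAtB str.toList (i + (j + 5)) = true :=
            quoteAt_of_drop str.toList (j + 5) i hipre
          have hqlt : i + (j + 5) < str.toList.length := quoteAtB_lt _ _ hq
          have hLq : Lfun str.toList (i + (j + 5) + 1) = j :=
            Lfun_eq_of_max str.toList j _ hjsrc hmax' (by omega)
          have hRge : i + (j + 5) ≤ Rfun str.toList str.toList.length := by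
            refine Rfun_ub str.toList str.toList.length (i + (j + 5)) hqlt hq ?_ ?_ <;>
              rw [hLq] <;> omega
          have hRle : Rfun str.toList str.toList.length ≤ i + (j + 5) := by
            rcases Rfun_zero_or str.toList str.toList.length with h0 | ⟨h1, h2, _, _⟩
            · omega
            · have hge : j + 5 ≤ Rfun str.toList str.toList.length := by omega
              have hi : Rfun str.toList str.toList.length - (j + 5) + (j + 5) =
                  Rfun str.toList str.toList.length := by omega
              have hpre := drop_prefix_of_quoteAt str.toList (j + 5)
                (Rfun str.toList str.toList.length - (j + 5)) (by rw [hi]; exact h2)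
              have := himax _ (by omega) hpre
              omega
          have hRn : Rfun str.toList str.toList.length = i + (j + 5) := by omega
          have hr : PySem.Str.rfindFrom str "\"" (PySem.Str.rfind str "src" + 5) =
              ((j + 5 : Nat) : Int) + (i : Int) := by
            rw [hrf, rfindFrom_natCast, if_neg hlen]
            have hgoq : PySem.Chars.rfind (str.toList.drop (j + 5)) ['"'] = (i : Int) := hival
            rw [hgoq, if_neg (by omega)]
          have hiq : ((j + 5 : Nat) : Int) + (i : Int) = ((i + (j + 5) : Nat) : Int) := by
            push_cast; ring
          rw [hr, if_neg (by omega), hRn, hcast, hiq]
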